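-- pv_equiv track=rewrite | github.com/das-saptarshi/codes | geeksforgeeks/Predict the Column/solution.py | columnWithMaxZeros
-- ===== SOURCE A (Python) =====
-- from typing import List
--
-- def columnWithMaxZeros(arr: List[List[int]], N: int) -> int:
--     max_, index = 0, -1
--
--     for j in range(N):
--         total = 0
--         for i in range(N):
--             total += 1 - arr[i][j]
--
--         if total > max_:
--             index, max_ = j, total
--
--     return index
-- ===== SOURCE B (Python) =====
-- from typing import List
--
-- def columnWithMaxZeros(arr: List[List[int]], N: int) -> int:
--     counts = [0] * N
--     for i in range(N):
--         row = arr[i]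
--         for j in range(N):
--             counts[j] += 1 - row[j]
--
--     max_, index = 0, -1
--     for j in range(N):
--         if counts[j] > max_:
--             index, max_ = j, counts[j]
--     return index
-- ===== Notes on version B (the rewrite author's own statement) =====
-- stated objective: alternative
-- what changed: Replaces A's fused column-major scan (an inner pass recomputing each column sum before comparing) with a row-major single sweep that accumulates a per-column counts table, followed by a separate argmax pass over the table.
import Mathlib
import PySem

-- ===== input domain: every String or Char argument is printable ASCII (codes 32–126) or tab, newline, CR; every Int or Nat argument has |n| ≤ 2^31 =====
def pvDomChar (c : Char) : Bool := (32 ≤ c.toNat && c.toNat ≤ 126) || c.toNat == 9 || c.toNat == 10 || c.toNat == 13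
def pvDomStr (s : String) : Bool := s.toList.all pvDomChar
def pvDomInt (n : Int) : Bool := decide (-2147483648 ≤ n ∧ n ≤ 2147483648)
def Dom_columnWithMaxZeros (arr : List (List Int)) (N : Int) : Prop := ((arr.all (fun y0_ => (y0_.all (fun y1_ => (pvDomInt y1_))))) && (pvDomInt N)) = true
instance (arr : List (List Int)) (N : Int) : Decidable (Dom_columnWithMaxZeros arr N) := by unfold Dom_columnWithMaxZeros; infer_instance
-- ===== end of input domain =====

-- B replaces A's fused column-major scan by a row-major sweep building a per-column
-- counts table plus a separate argmax pass (alternative decomposition, same cost).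

-- ===== PORT A =====
def columnWithMaxZeros (arr : List (List Int)) (N : Int) : Int :=
  -- max_, index = 0, -1; for j in range(N): total = Σ_i 1-arr[i][j]; if total > max_: update
  (((PySem.List.pyRange 0 N 1).foldl
    (fun (s : Int × Int) j =>
      let total := (PySem.List.pyRange 0 N 1).foldl
        (fun total i => total + (1 - PySem.List.pyGetD (PySem.List.pyGetD arr i []) j 0)) 0
      if total > s.1 then (total, j) else s)
    (0, -1)) : Int × Int).2

-- ===== PORT B =====
def columnWithMaxZeros_alt (arr : List (List Int)) (N : Int) : Int :=
  -- counts = [0]*N; row-major accumulation; then argmax pass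
  let counts := (PySem.List.pyRange 0 N 1).foldl
    (fun counts i =>
      let row := PySem.List.pyGetD arr i []
      (PySem.List.pyRange 0 N 1).foldl
        (fun counts j =>
          PySem.List.pySetD counts j (PySem.List.pyGetD counts j 0 + (1 - PySem.List.pyGetD row j 0)))
        counts)
    (PySem.List.pyRepeat [(0 : Int)] N)
  (((PySem.List.pyRange 0 N 1).foldl
    (fun (s : Int × Int) j =>
      if PySem.List.pyGetD counts j 0 > s.1 then (PySem.List.pyGetD counts j 0, j) else s)
    (0, -1)) : Int × Int).2

-- ===== PRECONDITION & SPEC =====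
-- Pre_ excludes exactly the inputs where Python A raises IndexError: when N > 0 the
-- matrix must have at least N rows and each of its first N rows at least N entries.
def Pre_columnWithMaxZeros (arr : List (List Int)) (N : Int) : Prop :=
  0 < N → (N ≤ (arr.length : Int) ∧ ∀ row ∈ arr.take N.toNat, N ≤ (row.length : Int))
instance (arr : List (List Int)) (N : Int) : Decidable (Pre_columnWithMaxZeros arr N) := by
  unfold Pre_columnWithMaxZeros; infer_instance
def pvWitness_columnWithMaxZeros : List (List Int) × Int := ([[1, 0], [0, 0]], 2)

def Spec_columnWithMaxZeros (arr : List (List Int)) (N : Int) (out : Int) : Prop := out = columnWithMaxZeros_alt arr N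
instance (arr : List (List Int)) (N : Int) (out : Int) : Decidable (Spec_columnWithMaxZeros arr N out) := by unfold Spec_columnWithMaxZeros; infer_instance

-- ===== CLAIM (what is proved, stated in full; the proofs are below) =====
def Claim_equal_columnWithMaxZeros : Prop := ∀ (arr : List (List Int)) (N : Int), Dom_columnWithMaxZeros arr N → Pre_columnWithMaxZeros arr N → Spec_columnWithMaxZeros arr N (columnWithMaxZeros arr N)

-- ===== LEMMAS AND PROOFS =====

-- B's inner (per-row) update loop, after pyRange/pyGetD/pySetD are rewritten to Nat form.
def pvInner (row : List Int) (m : Nat) (cs : List Int) : List Int :=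
  (List.range m).foldl (fun cs k => cs.set k (cs.getD k 0 + (1 - row.getD k 0))) cs

lemma pvInner_length (row : List Int) (m : Nat) (cs : List Int) :
    (pvInner row m cs).length = cs.length := by
  induction m with
  | zero => simp [pvInner]
  | succ m ih => simp [pvInner, List.range_succ, List.foldl_append] at ih ⊢; simpa using ih

lemma pvInner_getD (row : List Int) (m j : Nat) (cs : List Int) (hj : j < cs.length) :
    (pvInner row m cs).getD j 0 =
      if j < m then cs.getD j 0 + (1 - row.getD j 0) else cs.getD j 0 := by
  induction m with
  | zero => simp [pvInner]
  | succ m ih =>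
    have hlen : (pvInner row m cs).length = cs.length := pvInner_length row m cs
    rw [pvInner, List.range_succ, List.foldl_append]
    simp only [List.foldl_cons, List.foldl_nil]
    rw [show ((List.range m).foldl (fun cs k => cs.set k (cs.getD k 0 + (1 - row.getD k 0))) cs) = pvInner row m cs from rfl]
    by_cases hjm : j = m
    · subst hjm
      have hm : j < (pvInner row j cs).length := hlen ▸ hj
      have h2 : (pvInner row j cs)[j] = cs.getD j 0 := by
        have h3 := ih
        rw [List.getD_eq_getElem?_getD, List.getElem?_eq_getElem hm] at h3
        simpa using h3
      simp [List.getD_eq_getElem?_getD, hm, h2]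
    · rw [List.getD_eq_getElem?_getD, List.getElem?_set_ne (by omega), ← List.getD_eq_getElem?_getD, ih]
      by_cases h1 : j < m
      · simp [h1, show j < m + 1 by omega]
      · simp [h1, show ¬ j < m + 1 by omega]

-- B's outer accumulation loop over the first m rows.
def pvOuter (arr : List (List Int)) (n m : Nat) : List Int :=
  (List.range m).foldl (fun cs i => pvInner (arr.getD i []) n cs) (List.replicate n 0)

lemma pvOuter_length (arr : List (List Int)) (n m : Nat) :
    (pvOuter arr n m).length = n := by
  induction m with
  | zero => simp [pvOuter]
  | succ m ih =>
    rw [pvOuter, List.range_succ, List.foldl_append]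
    simp only [List.foldl_cons, List.foldl_nil]
    rw [show ((List.range m).foldl (fun cs i => pvInner (arr.getD i []) n cs) (List.replicate n 0)) = pvOuter arr n m from rfl]
    rw [pvInner_length, ih]

lemma pvOuter_getD (arr : List (List Int)) (n m j : Nat) (hj : j < n) :
    (pvOuter arr n m).getD j 0 =
      ((List.range m).map (fun i => 1 - (arr.getD i []).getD j 0)).sum := by
  induction m with
  | zero => simp [pvOuter, hj]
  | succ m ih =>
    rw [pvOuter, List.range_succ, List.foldl_append]
    simp only [List.foldl_cons, List.foldl_nil]
    rw [show ((List.range m).foldl (fun cs i => pvInner (arr.getD i []) n cs) (List.replicate n 0)) = pvOuter arr n m from rfl]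
    rw [pvInner_getD _ _ _ _ (by rw [pvOuter_length]; exact hj), if_pos hj, ih]
    simp

lemma pyRange_zero_cast (N : Int) :
    PySem.List.pyRange 0 N 1 = (List.range N.toNat).map (fun k : Nat => (k : Int)) := by
  rw [PySem.List.pyRange_one]
  simp only [sub_zero, zero_add]

theorem columnWithMaxZeros_eq_alt (arr : List (List Int)) (N : Int) :
    columnWithMaxZeros arr N = columnWithMaxZeros_alt arr N := by
  unfold columnWithMaxZeros columnWithMaxZeros_alt
  rw [pyRange_zero_cast, PySem.List.pyRepeat_singleton]
  simp only [List.foldl_map, PySem.List.pyGetD_natCast, PySem.List.pySetD_natCast]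
  rw [show ((List.range N.toNat).foldl
        (fun counts i =>
          (List.range N.toNat).foldl
            (fun counts j => counts.set j (counts.getD j 0 + (1 - (arr.getD i []).getD j 0))) counts)
        (List.replicate N.toNat 0)) = pvOuter arr N.toNat N.toNat from rfl]
  congr 1
  apply PySem.List.foldl_congr_mem
  intro s j hjmem
  have hj : j < N.toNat := List.mem_range.mp hjmem
  rw [PySem.List.foldl_add (g := fun i : Nat => 1 - (arr.getD i []).getD j 0), pvOuter_getD arr N.toNat N.toNat j hj]
  simp

-- ===== VERDICT (by name: the statement is the Claim_ definition above) =====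
theorem columnWithMaxZeros_spec : Claim_equal_columnWithMaxZeros := by
  intro arr N _ _
  unfold Spec_columnWithMaxZeros
  exact columnWithMaxZeros_eq_alt arr N
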